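-- pv_equiv track=rewrite | github.com/blackdog70/mm485 | mm485/packet.py | enc128
-- ===== SOURCE A (Python) =====
-- def enc128(data):
--     def enc(_c, _n, _msb):
--         _lsb = ((_c << _n) | _msb) & 127
--         _msb = _c >> (7 - _n)
--         return _lsb, _msb
--
--     v = []
--     n = 0
--     msb = 0
--     for c in data:
--         lsb, msb = enc(c, n, msb)
--         v.append(lsb)
--         if n < 7:
--             n += 1
--         else:
--             lsb, msb = enc(msb, 0, 0)
--             v.append(lsb)
--             n = 1
--     # if msb or len(v) < round(((len(data) / 7) * 8) + 0.5):
--     if msb: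
--         v.append(msb)
--     return v
-- ===== SOURCE B (Python) =====
-- def enc128(data):
--     # Stateless stencil: each output depends only on the position i (mod 7)
--     # and the pair (previous byte, current byte); no running (n, msb) machine.
--     v = []
--     for i, (prev, c) in enumerate(zip([0] + data, data)):
--         n = (i - 1) % 7 + 1 if i else 0
--         carry = prev >> ((-i) % 7 + 1) if i else 0
--         v.append(((c << n) | carry) & 127)
--         if n == 7:
--             v.append(c & 127)
--     if data:
--         tail = data[-1] >> ((-len(data)) % 7 + 1)
--         if tail:
--             v.append(tail)
--     return v
-- ===== Notes on version B (the rewrite author's own statement) =====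
-- stated objective: alternative
-- what changed: Replaced A's stateful loop (running (n, msb) counter pair fed through an enc helper, with a special re-emit branch at n == 7) by a stateless positional stencil: each output is computed in closed form from the index modulo 7 and the pair (previous byte, current byte), with the tail taken directly from the last element.
import Mathlib
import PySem

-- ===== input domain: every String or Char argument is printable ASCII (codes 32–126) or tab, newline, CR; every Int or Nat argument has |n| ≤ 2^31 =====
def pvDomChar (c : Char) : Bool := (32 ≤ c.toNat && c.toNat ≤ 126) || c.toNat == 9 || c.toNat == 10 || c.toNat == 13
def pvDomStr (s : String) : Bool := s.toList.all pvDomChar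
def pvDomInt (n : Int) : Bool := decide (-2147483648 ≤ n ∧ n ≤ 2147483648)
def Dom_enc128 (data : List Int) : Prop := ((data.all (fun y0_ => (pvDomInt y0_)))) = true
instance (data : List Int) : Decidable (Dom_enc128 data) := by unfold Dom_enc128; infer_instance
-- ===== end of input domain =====

-- B replaces A's running (n, msb) state machine by a stateless positional stencil
-- over (index mod 7, previous byte, current byte); same cost, different decomposition.

-- ===== PORT A =====
-- A's local enc helper; n : Nat (A keeps 0 ≤ n ≤ 7, so '7 - n' never shifts negatively)
def encA (c : Int) (n : Nat) (msb : Int) : Int × Int :=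
  (PySem.Int.band (PySem.Int.bor (c <<< n) msb) 127, c >>> (7 - n))

-- the body of A's for-loop over (v, n, msb)
def stepA (st : List Int × Nat × Int) (c : Int) : List Int × Nat × Int :=
  let (v, n, msb) := st
  let (lsb, msb) := encA c n msb
  let v := v ++ [lsb]
  if n < 7 then (v, n + 1, msb)
  else
    let (lsb2, msb2) := encA msb 0 0
    (v ++ [lsb2], 1, msb2)

def enc128 (data : List Int) : List Int :=
  let st := data.foldl stepA ([], 0, 0)
  if st.2.2 ≠ 0 then st.1 ++ [st.2.2] else st.1  -- 'if msb:' = msb nonzero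

-- ===== PORT B =====
-- Source B's loop over enumerate(zip([0]+data, data)), appending to v; the Python
-- shift counts '(i-1)%7+1' and '(-i)%7+1' are nonnegative, so '.toNat' is exact.
def altGo (v : List Int) (i : Nat) : List (Int × Int) → List Int
  | [] => v
  | (prev, c) :: rest =>
    let n : Nat := if i = 0 then 0 else (i - 1) % 7 + 1
    let carry : Int := if i = 0 then 0 else prev >>> ((PySem.Int.mod (-(i : Int)) 7).toNat + 1)
    let v := v ++ [PySem.Int.band (PySem.Int.bor (c <<< n) carry) 127]
    let v := if n = 7 then v ++ [PySem.Int.band c 127] else v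
    altGo v (i + 1) rest

def enc128_alt (data : List Int) : List Int :=
  let v := altGo [] 0 ((0 :: data).zip data)
  if data ≠ [] then
    let tail := (PySem.List.pyGetD data (-1) 0) >>>
      ((PySem.Int.mod (-(data.length : Int)) 7).toNat + 1)
    if tail ≠ 0 then v ++ [tail] else v
  else v

-- ===== PRECONDITION & SPEC =====
def Spec_enc128 (data : List Int) (out : List Int) : Prop := out = enc128_alt data
instance (data : List Int) (out : List Int) : Decidable (Spec_enc128 data out) := by unfold Spec_enc128; infer_instance

-- ===== CLAIM (what is proved, stated in full; the proofs are below) =====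
def Claim_equal_enc128 : Prop := ∀ (data : List Int), Dom_enc128 data → Spec_enc128 data (enc128 data)

-- ===== LEMMAS AND PROOFS =====

-- closed forms for A's loop state at position i (prev = element i-1)
def nf (i : Nat) : Nat := if i = 0 then 0 else (i - 1) % 7 + 1
def sh (i : Nat) : Nat := (7 - i % 7) % 7 + 1
def cf (i : Nat) (prev : Int) : Int := if i = 0 then 0 else prev >>> sh i

-- common intermediate form: the body outputs from position i on
def chunks (i : Nat) (prev : Int) : List Int → List Int
  | [] => []
  | c :: rest =>
    PySem.Int.band (PySem.Int.bor (c <<< nf i) (cf i prev)) 127 ::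
      ((if nf i = 7 then [PySem.Int.band c 127] else []) ++ chunks (i + 1) c rest)

lemma mod_neg_toNat (i : Nat) : (PySem.Int.mod (-(i : Int)) 7).toNat = (7 - i % 7) % 7 := by
  rw [PySem.Int.mod_eq_emod_of_pos (by norm_num : (0:Int) < 7)]
  omega

lemma emod_neg_toNat (i : Nat) : ((-(i : Int)) % 7).toNat = (7 - i % 7) % 7 := by omega

lemma nf_succ_lt {i : Nat} (h : nf i < 7) : nf (i + 1) = nf i + 1 := by
  rcases i with _ | j; simp [nf] at *; simp [nf] at *; omega

lemma sh_succ_lt {i : Nat} (h : nf i < 7) : sh (i + 1) = 7 - nf i := by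
  rcases i with _ | j; simp [nf, sh] at *; simp [nf, sh] at *; omega

lemma nf_succ_eq {i : Nat} (h : ¬ nf i < 7) : nf (i + 1) = 1 := by
  rcases i with _ | j; simp [nf] at *; simp [nf] at *; omega

lemma sh_succ_eq {i : Nat} (h : ¬ nf i < 7) : sh (i + 1) = 7 := by
  rcases i with _ | j; simp [nf] at *; simp [nf, sh] at *; omega

lemma nf_le (i : Nat) : nf i ≤ 7 := by
  rcases i with _ | j; simp [nf]; simp [nf]; omega

lemma foldA (l : List Int) : ∀ (i : Nat) (p : Int) (v : List Int),
    l.foldl stepA (v, nf i, cf i p)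
      = (v ++ chunks i p l, nf (i + l.length), cf (i + l.length) (l.getLastD p)) := by
  induction l with
  | nil => intro i p v; simp [chunks]
  | cons c rest ih =>
    intro i p v
    by_cases h7 : nf i < 7
    · have hstep : stepA (v, nf i, cf i p) c
          = (v ++ [PySem.Int.band (PySem.Int.bor (c <<< nf i) (cf i p)) 127],
             nf (i + 1), cf (i + 1) c) := by
        simp [stepA, encA, h7, nf_succ_lt h7, cf, sh_succ_lt h7]
      simp only [List.foldl_cons, hstep, ih (i + 1) c]
      rw [show i + 1 + rest.length = i + (c :: rest).length from by simp; omega]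
      simp [chunks, Nat.ne_of_lt h7]
      cases rest with
      | nil => simp
      | cons b t =>
        rcases Option.isSome_iff_exists.mp (by simp : ((b :: t) : List Int).getLast?.isSome) with ⟨x, hx⟩
        simp [hx]
    · have h7' : nf i = 7 := Nat.le_antisymm (nf_le i) (Nat.not_lt.mp h7)
      have hstep : stepA (v, nf i, cf i p) c
          = (v ++ [PySem.Int.band (PySem.Int.bor (c <<< nf i) (cf i p)) 127,
                   PySem.Int.band c 127],
             nf (i + 1), cf (i + 1) c) := by
        simp [stepA, encA, h7', cf, nf_succ_eq h7, sh_succ_eq h7]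
      simp only [List.foldl_cons, hstep, ih (i + 1) c]
      rw [show i + 1 + rest.length = i + (c :: rest).length from by simp; omega]
      simp [chunks, h7']
      cases rest with
      | nil => simp
      | cons b t =>
        rcases Option.isSome_iff_exists.mp (by simp : ((b :: t) : List Int).getLast?.isSome) with ⟨x, hx⟩
        simp [hx]

lemma altGo_eq (l : List Int) : ∀ (i : Nat) (p : Int) (v : List Int),
    altGo v i ((p :: l).zip l) = v ++ chunks i p l := by
  induction l with
  | nil => intro i p v; simp [altGo, chunks]
  | cons c rest ih =>
    intro i p v
    rcases Nat.eq_zero_or_pos i with hi | hi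
    · subst hi
      simp [altGo, chunks, nf, cf, ih 1 c]
    · have hne : i ≠ 0 := by omega
      simp [altGo, chunks, nf, cf, sh, hne, emod_neg_toNat, ih (i + 1) c]
      split <;> simp

lemma pyGetD_neg_one (l : List Int) (h : l ≠ []) :
    PySem.List.pyGetD l (-1) 0 = l.getLastD 0 := by
  have h1 : 1 ≤ l.length := List.length_pos_iff.mpr h
  have hl : l.length - 1 < l.length := by omega
  simp [PySem.List.pyGetD, PySem.List.pyGet?, PySem.List.pyIdx?, h1, hl,
        List.getLastD_eq_getLast?, List.getLast?_eq_getElem?]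

-- ===== VERDICT (by name: the statement is the Claim_ definition above) =====
theorem enc128_spec : Claim_equal_enc128 := by
  intro data _
  show enc128 data = enc128_alt data
  have hA : data.foldl stepA ([], 0, 0)
      = (chunks 0 0 data, nf data.length, cf data.length (data.getLastD 0)) := by
    have := foldA data 0 0 []
    simpa [nf, cf] using this
  rcases data with _ | ⟨c, rest⟩
  · simp [enc128, enc128_alt, altGo, hA, cf, chunks]
  · have hne : (c :: rest) ≠ [] := by simp
    have ht : (PySem.List.pyGetD (c :: rest) (-1) 0) >>>
          ((PySem.Int.mod (-((c :: rest).length : Int)) 7).toNat + 1)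
        = cf (c :: rest).length ((c :: rest).getLastD 0) := by
      rw [pyGetD_neg_one _ hne, mod_neg_toNat]
      simp [cf, sh]
    simp only [enc128, enc128_alt, hA, altGo_eq (c :: rest) 0 0 [], ht,
               List.nil_append]
    simp
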